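-- pv_equiv track=rewrite | github.com/UniSurreyIoT/SAX-LDA | RuleEngine/genericRule.py | has_upward_peak
-- ===== SOURCE A (Python) =====
-- def has_upward_peak(pattern):
--     going_up = pattern[0]<pattern[1]
--     if not going_up:
--         return going_up
--     for i in range(0, len(pattern)-1):
--         if going_up:
--             if pattern[i]>pattern[i+1]:
--                 going_up = False
--             else:
--                 continue
--         else:
--             if pattern[i]>pattern[i+1]:
--                 continue
--             else:
--                 return False
--     return not going_up
-- ===== SOURCE B (Python) =====
-- def has_upward_peak(pattern):
--     if not pattern[0] < pattern[1]:
--         return False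
--     k = next((i for i in range(len(pattern) - 1) if pattern[i] > pattern[i + 1]), None)
--     if k is None:
--         return False
--     return all(pattern[i] > pattern[i + 1] for i in range(k, len(pattern) - 1))
-- ===== Notes on version B (the rewrite author's own statement) =====
-- stated objective: idiomatic
-- what changed: Replaces the single mutable-flag state machine with a locate-then-verify decomposition: guard the first step, find the first strict descent, then check every later step is strictly decreasing.
-- outside the precondition, e.g. on has_upward_peak([5]): A raises IndexError, B raises IndexError
import Mathlib
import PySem

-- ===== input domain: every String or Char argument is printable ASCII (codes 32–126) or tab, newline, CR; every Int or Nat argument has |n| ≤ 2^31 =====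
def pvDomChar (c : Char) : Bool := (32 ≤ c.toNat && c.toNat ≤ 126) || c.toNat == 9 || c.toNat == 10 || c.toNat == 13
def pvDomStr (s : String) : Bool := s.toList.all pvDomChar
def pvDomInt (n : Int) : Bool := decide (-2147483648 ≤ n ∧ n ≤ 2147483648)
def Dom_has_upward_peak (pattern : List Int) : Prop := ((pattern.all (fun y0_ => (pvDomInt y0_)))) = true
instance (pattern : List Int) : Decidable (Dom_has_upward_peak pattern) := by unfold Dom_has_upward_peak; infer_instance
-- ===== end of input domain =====

-- B replaces A's mutable-flag state machine with a locate-then-verify decomposition (idiomatic, same cost).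


-- ===== PORT A =====
-- loop over adjacent pairs carrying A's mutable going_up flag
def pvLoopA : List Int → Bool → Bool
  | a :: b :: rest, going_up =>
    if going_up then
      if a > b then pvLoopA (b :: rest) false else pvLoopA (b :: rest) true
    else
      if a > b then pvLoopA (b :: rest) false else false
  | _, going_up => !going_up

def has_upward_peak (pattern : List Int) : Bool :=
  match pattern with
  | a :: b :: _ => if !(decide (a < b)) then false else pvLoopA pattern true
  | _ => false  -- Python raises IndexError here; excluded by Pre_

-- ===== PORT B =====
-- B: locate the suffix starting at the first strict descent, then verify it
def pvDescSuffix : List Int → Option (List Int)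
  | a :: b :: rest => if a > b then some (a :: b :: rest) else pvDescSuffix (b :: rest)
  | _ => none

def pvAllDesc : List Int → Bool
  | a :: b :: rest => decide (a > b) && pvAllDesc (b :: rest)
  | _ => true

def has_upward_peak_alt (pattern : List Int) : Bool :=
  match pattern with
  | a :: b :: _ =>
    if a < b then
      match pvDescSuffix pattern with
      | none => false
      | some s => pvAllDesc s
    else false
  | _ => false  -- Python raises IndexError here; excluded by Pre_

-- ===== PRECONDITION & SPEC =====
-- Pre_ excludes lists with fewer than two elements, on which A raises IndexError.
def Pre_has_upward_peak (pattern : List Int) : Prop := 2 ≤ pattern.length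
instance (pattern : List Int) : Decidable (Pre_has_upward_peak pattern) := by unfold Pre_has_upward_peak; infer_instance
def pvWitness_has_upward_peak : List Int := [1, 3, 2]
def Spec_has_upward_peak (pattern : List Int) (out : Bool) : Prop := out = has_upward_peak_alt pattern
instance (pattern : List Int) (out : Bool) : Decidable (Spec_has_upward_peak pattern out) := by unfold Spec_has_upward_peak; infer_instance

-- ===== CLAIM (what is proved, stated in full; the proofs are below) =====
def Claim_equal_has_upward_peak : Prop := ∀ (pattern : List Int), Dom_has_upward_peak pattern → Pre_has_upward_peak pattern → Spec_has_upward_peak pattern (has_upward_peak pattern)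

-- ===== LEMMAS AND PROOFS =====
lemma pvLoopA_false (l : List Int) : pvLoopA l false = pvAllDesc l := by
  induction l with
  | nil => rfl
  | cons a t ih =>
    cases t with
    | nil => rfl
    | cons b rest =>
      simp only [pvLoopA, pvAllDesc]
      by_cases h : a > b
      · simp [h, ih]
      · simp [h]

lemma pvLoopA_true (l : List Int) :
    pvLoopA l true = (match pvDescSuffix l with | none => false | some s => pvAllDesc s) := by
  induction l with
  | nil => rfl
  | cons a t ih =>
    cases t with
    | nil => rfl
    | cons b rest =>
      simp only [pvLoopA, pvDescSuffix]
      by_cases h : a > b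
      · simp [h, pvLoopA_false, pvAllDesc]
      · simp only [if_neg h, if_pos]
        simpa [h] using ih

-- ===== VERDICT (by name: the statement is the Claim_ definition above) =====
theorem has_upward_peak_spec : Claim_equal_has_upward_peak := by
  intro pattern _ hpre
  unfold Spec_has_upward_peak has_upward_peak has_upward_peak_alt
  match pattern with
  | [] => simp [Pre_has_upward_peak] at hpre
  | [a] => simp [Pre_has_upward_peak] at hpre
  | a :: b :: rest =>
    by_cases h : a < b
    · simp [h, pvLoopA_true]
    · simp [h]
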